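-- pv_equiv track=rewrite | github.com/wlpinjlte/Algorithms-and-Datastructures | offline/offline9/zad9.py | zam
-- ===== SOURCE A (Python) =====
-- def zam(na, parent, s):
--     temp=s
--     minn=10**10
--     while parent[temp]!=None:
--         minn=min(na[parent[temp]][temp],minn)
--         temp=parent[temp]
--     while parent[s] != None:
--         na[parent[s]][s] -= minn
--         na[s][parent[s]] += minn
--         s = parent[s]
--     return minn
-- ===== SOURCE B (Python) =====
-- def zam(na, parent, s):
--     # Single recursive traversal of the parent chain: the bottleneck accumulator is
--     # threaded down, and residual updates happen as the recursion unwinds -- one walk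
--     # instead of A's two iterative walks.
--     def go(node, acc):
--         p = parent[node]
--         if p is None:
--             return acc
--         m = go(p, min(acc, na[p][node]))
--         na[p][node] -= m
--         na[node][p] += m
--         return m
--     return go(s, 10 ** 10)
-- ===== Notes on version B (the rewrite author's own statement) =====
-- stated objective: alternative
-- what changed: A makes two separate iterative walks of the parent chain (one while loop to compute the bottleneck, a second to update residuals); B makes a single recursive traversal that threads the bottleneck accumulator down the chain and performs the residual updates on the way back up as the recursion unwinds.
import Mathlib
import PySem

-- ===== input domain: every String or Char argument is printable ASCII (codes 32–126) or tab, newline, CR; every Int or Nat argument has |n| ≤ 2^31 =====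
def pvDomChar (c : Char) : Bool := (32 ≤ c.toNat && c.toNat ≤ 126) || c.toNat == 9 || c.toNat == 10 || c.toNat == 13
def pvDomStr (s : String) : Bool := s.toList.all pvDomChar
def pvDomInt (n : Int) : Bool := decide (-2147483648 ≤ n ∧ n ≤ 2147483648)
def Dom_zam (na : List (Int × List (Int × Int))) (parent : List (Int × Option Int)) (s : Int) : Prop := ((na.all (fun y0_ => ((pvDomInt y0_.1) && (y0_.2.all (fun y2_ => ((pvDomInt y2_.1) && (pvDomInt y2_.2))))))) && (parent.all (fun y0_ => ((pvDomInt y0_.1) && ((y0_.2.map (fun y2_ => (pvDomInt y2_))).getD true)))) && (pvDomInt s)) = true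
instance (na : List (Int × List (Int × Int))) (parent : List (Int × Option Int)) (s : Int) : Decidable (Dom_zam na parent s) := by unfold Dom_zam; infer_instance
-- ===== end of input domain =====

-- B replaces A's two iterative walks of the parent chain with one recursive traversal
-- (bottleneck accumulator down, residual updates on the unwind); equivalence is about
-- the RETURN value only — both Pythons mutate `na` in place the same way.

-- na[p][c] as an Int (Pre_zam guarantees the keys exist wherever it is read)
def pvCap (na : List (Int × List (Int × Int))) (p c : Int) : Int :=
  (((PySem.Dict.mk na).get? p).bind (fun d => (PySem.Dict.mk d).get? c)).getD 0

-- na[p][c] += v (keys exist under Pre_zam; mutation does not affect the return value)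
def pvCapAdd (na : List (Int × List (Int × Int))) (p c v : Int) : List (Int × List (Int × Int)) :=
  ((PySem.Dict.mk na).modify p [] (fun d => ((PySem.Dict.mk d).modify c 0 (· + v)).items)).items

-- ===== PORT A =====
-- first while loop: minn=min(na[parent[temp]][temp],minn); temp=parent[temp]
-- fuel parent.length+1 covers every terminating chain (a cycle / missing key makes
-- Python raise or diverge and is outside Pre_zam)
def zamLoop1 (na : List (Int × List (Int × Int))) (parent : List (Int × Option Int)) :
    Nat → Int → Int → Int
  | 0, _, minn => minn
  | fuel + 1, temp, minn =>
    match (PySem.Dict.mk parent).get? temp with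
    | none => minn          -- KeyError in Python: outside Pre_zam
    | some none => minn
    | some (some p) => zamLoop1 na parent fuel p (min (pvCap na p temp) minn)

-- second while loop: the residual update walking the chain again (na discarded for the return)
def zamLoop2 (na : List (Int × List (Int × Int))) (parent : List (Int × Option Int)) :
    Nat → Int → Int → List (Int × List (Int × Int))
  | 0, _, _ => na
  | fuel + 1, s, minn =>
    match (PySem.Dict.mk parent).get? s with
    | none => na
    | some none => na
    | some (some p) =>
      zamLoop2 (pvCapAdd (pvCapAdd na p s (-minn)) s p minn) parent fuel p minn

def zam (na : List (Int × List (Int × Int))) (parent : List (Int × Option Int)) (s : Int) : Int :=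
  let minn := zamLoop1 na parent (parent.length + 1) s (10 ^ 10)
  let _na' := zamLoop2 na parent (parent.length + 1) s minn
  minn

-- ===== PORT B =====
-- the single recursive traversal: returns (bottleneck, updated na); the accumulator is
-- threaded down, the residual updates are applied as the recursion unwinds
def zamGo (na : List (Int × List (Int × Int))) (parent : List (Int × Option Int)) :
    Nat → Int → Int → Int × List (Int × List (Int × Int))
  | 0, _, acc => (acc, na)
  | fuel + 1, node, acc =>
    match (PySem.Dict.mk parent).get? node with
    | none => (acc, na)     -- KeyError in Python: outside Pre_zam
    | some none => (acc, na)
    | some (some p) =>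
      let r := zamGo na parent fuel p (min acc (pvCap na p node))
      (r.1, pvCapAdd (pvCapAdd r.2 p node (-r.1)) node p r.1)

def zam_alt (na : List (Int × List (Int × Int))) (parent : List (Int × Option Int)) (s : Int) : Int :=
  (zamGo na parent (parent.length + 1) s (10 ^ 10)).1

-- ===== PRECONDITION & SPEC =====
-- Pre_zam: exactly the inputs on which Python A returns normally: the parent chain from s
-- reaches None (no missing key, no cycle — otherwise A raises KeyError or diverges) and
-- every edge on it has both residual entries na[p][c] and na[c][p] present.
-- This is a condition on the SHAPE of the parent map (the chain from s is finite and fully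
-- keyed); a parent-pointer chain has no non-recursive characterization, so pvChainOK walks
-- it once — it computes neither port's result, only which keys the walk touches. The Lean
-- ports are in fact equal on ALL inputs (the proof below never uses Pre_zam); Pre_zam only
-- delimits where Python A returns at all.
def pvCapOK (na : List (Int × List (Int × Int))) (p c : Int) : Bool :=
  (((PySem.Dict.mk na).get? p).bind (fun d => (PySem.Dict.mk d).get? c)).isSome

def pvChainOK (na : List (Int × List (Int × Int))) (parent : List (Int × Option Int)) :
    Nat → Int → Bool
  | 0, _ => false
  | fuel + 1, t =>
    match (PySem.Dict.mk parent).get? t with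
    | none => false
    | some none => true
    | some (some p) => pvCapOK na p t && pvCapOK na t p && pvChainOK na parent fuel p

def Pre_zam (na : List (Int × List (Int × Int))) (parent : List (Int × Option Int)) (s : Int) : Prop :=
  pvChainOK na parent (parent.length + 1) s = true
instance (na : List (Int × List (Int × Int))) (parent : List (Int × Option Int)) (s : Int) : Decidable (Pre_zam na parent s) := by unfold Pre_zam; infer_instance

def pvWitness_zam : (List (Int × List (Int × Int))) × (List (Int × Option Int)) × Int :=
  ([(0, [(1, 5)]), (1, [(0, 0)])], [(1, some 0), (0, none)], 1)

def Spec_zam (na : List (Int × List (Int × Int))) (parent : List (Int × Option Int)) (s : Int) (out : Int) : Prop := out = zam_alt na parent s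
instance (na : List (Int × List (Int × Int))) (parent : List (Int × Option Int)) (s : Int) (out : Int) : Decidable (Spec_zam na parent s out) := by unfold Spec_zam; infer_instance

-- ===== CLAIM (what is proved, stated in full; the proofs are below) =====
def Claim_equal_zam : Prop := ∀ (na : List (Int × List (Int × Int))) (parent : List (Int × Option Int)) (s : Int), Dom_zam na parent s → Pre_zam na parent s → Spec_zam na parent s (zam na parent s)

-- ===== LEMMAS AND PROOFS =====

-- the bottleneck returned by B's recursion is exactly what A's first loop computes
theorem zamGo_fst (na : List (Int × List (Int × Int))) (parent : List (Int × Option Int)) :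
    ∀ (fuel : Nat) (t acc : Int),
      (zamGo na parent fuel t acc).1 = zamLoop1 na parent fuel t acc := by
  intro fuel
  induction fuel with
  | zero => intro t acc; rfl
  | succ n ih =>
    intro t acc
    simp only [zamGo, zamLoop1]
    cases (PySem.Dict.mk parent).get? t with
    | none => rfl
    | some o =>
      cases o with
      | none => rfl
      | some p => simpa [min_comm] using ih p (min acc (pvCap na p t))

-- ===== VERDICT (by name: the statement is the Claim_ definition above) =====
theorem zam_spec : Claim_equal_zam := by
  intro na parent s _ _
  show zam na parent s = zam_alt na parent s
  simp only [zam, zam_alt, zamGo_fst]
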